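-- pv_equiv track=rewrite | github.com/jungjae0/international-cropmonitoring | rda_offline_crop_analysis_system/crop_analysis_system/pipeline/services/area_calc.py | get_crop_list
-- ===== SOURCE A (Python) =====
-- from typing import Dict, List, Tuple, Iterable
--
-- def get_crop_list(crops_str: str) -> List[str]:
--     alias_map = {
--         "corn": "Corn",
--         "maize": "Corn",
--         "soy": "Soybean",
--         "soybean": "Soybean",
--         "soybeans": "Soybean",
--         "springwheat": "SpringWheat",
--         "spring_wheat": "SpringWheat",
--         "winterwheat": "WinterWheat",
--         "winter_wheat": "WinterWheat",
--     }
--     raw_list = [c.strip().lower() for c in crops_str.replace(" ", ",").split(",") if c.strip()]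
--     final_list = []
--     for item in raw_list:
--         if item in alias_map:
--             val = alias_map[item]
--             if val not in final_list:
--                 final_list.append(val)
--         else:
--             if item.capitalize() not in final_list:
--                 final_list.append(item.capitalize())
--     return final_list
-- ===== SOURCE B (Python) =====
-- def get_crop_list(crops_str: str):
--     alias_map = {
--         "corn": "Corn",
--         "maize": "Corn",
--         "soy": "Soybean",
--         "soybean": "Soybean",
--         "soybeans": "Soybean",
--         "springwheat": "SpringWheat",
--         "spring_wheat": "SpringWheat",
--         "winterwheat": "WinterWheat",
--         "winter_wheat": "WinterWheat",
--     }
--     # single-pass character scanner: no replace/split preprocessing, no intermediate lists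
--     final = []
--     cur = []
--     def emit():
--         tok = "".join(cur).strip().lower()
--         cur.clear()
--         if tok:
--             name = alias_map.get(tok, tok.capitalize())
--             if name not in final:
--                 final.append(name)
--     for ch in crops_str:
--         if ch == " " or ch == ",":
--             emit()
--         else:
--             cur.append(ch)
--     emit()
--     return final
-- ===== Notes on version B (the rewrite author's own statement) =====
-- stated objective: alternative
-- what changed: A's staged pipeline (replace spaces with commas, split on commas, a strip/lower/filter comprehension, then a map+dedup loop over that token list) is replaced by a single character-level scan of the string that accumulates the current token and, at each delimiter and at the end, emits its stripped/lowercased canonical name into the result; no intermediate token lists are built.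
import Mathlib
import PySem

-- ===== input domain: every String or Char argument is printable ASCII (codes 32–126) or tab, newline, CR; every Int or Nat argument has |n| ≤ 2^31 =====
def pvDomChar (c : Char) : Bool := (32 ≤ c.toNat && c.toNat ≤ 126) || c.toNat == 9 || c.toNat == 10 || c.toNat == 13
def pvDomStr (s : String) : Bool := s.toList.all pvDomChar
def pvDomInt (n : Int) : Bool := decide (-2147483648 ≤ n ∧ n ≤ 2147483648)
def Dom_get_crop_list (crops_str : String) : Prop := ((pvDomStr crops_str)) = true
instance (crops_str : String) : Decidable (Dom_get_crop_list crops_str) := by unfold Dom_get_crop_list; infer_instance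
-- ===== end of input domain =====

-- B replaces A's staged pipeline (replace spaces, split on commas, strip/lower comprehension,
-- then a map+dedup loop) by a single character-level scan that accumulates the current token
-- and emits its canonical name at each delimiter: objective 'alternative'.

-- alias_map, as an insertion-ordered association list (keys distinct, so first-match lookup = dict lookup)
def pvAliasMap : List (String × String) :=
  [("corn", "Corn"), ("maize", "Corn"), ("soy", "Soybean"), ("soybean", "Soybean"),
   ("soybeans", "Soybean"), ("springwheat", "SpringWheat"), ("spring_wheat", "SpringWheat"),
   ("winterwheat", "WinterWheat"), ("winter_wheat", "WinterWheat")]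

-- item.capitalize(): first char title-cased, rest lowercased; exact on the ASCII domain
def pvCapitalize (s : String) : String :=
  match s.toList with
  | [] => ""
  | c :: rest => String.ofList (PySem.Chars.upperChar c :: rest.map PySem.Chars.lowerChar)

-- ===== PORT A =====
-- [c.strip().lower() for c in crops_str.replace(" ", ",").split(",") if c.strip()]
def pvRawList (crops_str : String) : List String :=
  ((PySem.Chars.splitOn (PySem.Chars.replace crops_str.toList [' '] [',']) [',']).filter
      (fun c => !(PySem.Chars.strip c == []))).map
    (fun c => String.ofList (PySem.Chars.lower (PySem.Chars.strip c)))

def get_crop_list (crops_str : String) : List String :=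
  (pvRawList crops_str).foldl
    (fun final_list item =>
      match pvAliasMap.lookup item with
      | some val => if final_list.contains val then final_list else final_list ++ [val]
      | none =>
          if final_list.contains (pvCapitalize item) then final_list
          else final_list ++ [pvCapitalize item])
    []

-- ===== PORT B =====
-- emit(): tok = ''.join(cur).strip().lower(); if tok: name = alias_map.get(tok, tok.capitalize());
--         if name not in final: final.append(name)
def pvEmit (cur : List Char) (final : List String) : List String :=
  let tok := PySem.Chars.lower (PySem.Chars.strip cur)
  if tok = [] then final
  else
    let name := (pvAliasMap.lookup (String.ofList tok)).getD (pvCapitalize (String.ofList tok))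
    if final.contains name then final else final ++ [name]

-- for ch in crops_str: delimiter → emit and reset cur, else append ch to cur; final emit at the end
def get_crop_list_alt (crops_str : String) : List String :=
  let st := crops_str.toList.foldl
    (fun (st : List Char × List String) ch =>
      if ch = ' ' ∨ ch = ',' then ([], pvEmit st.1 st.2) else (st.1 ++ [ch], st.2))
    ([], [])
  pvEmit st.1 st.2

-- ===== PRECONDITION & SPEC =====
def Spec_get_crop_list (crops_str : String) (out : List String) : Prop := out = get_crop_list_alt crops_str
instance (crops_str : String) (out : List String) : Decidable (Spec_get_crop_list crops_str out) := by unfold Spec_get_crop_list; infer_instance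

-- ===== CLAIM =====
def Claim_equal_get_crop_list : Prop := ∀ (crops_str : String), Dom_get_crop_list crops_str → Spec_get_crop_list crops_str (get_crop_list crops_str)

-- ===== LEMMAS AND PROOFS =====

-- prepend a chunk onto the first piece of a split
def pvConsHead (p : List Char) : List (List Char) → List (List Char)
  | [] => [p]
  | h :: t => (p ++ h) :: t

-- reference tokenizer: split a char list at every ' ' or ','
def pvTokSplit : List Char → List (List Char)
  | [] => [[]]
  | c :: cs => if c = ' ' ∨ c = ',' then [] :: pvTokSplit cs else pvConsHead [c] (pvTokSplit cs)

theorem pvConsHead_assoc (a b : List Char) (l : List (List Char)) :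
    pvConsHead a (pvConsHead b l) = pvConsHead (a ++ b) l := by
  cases l <;> simp [pvConsHead]

theorem pvConsHead_nil (l : List (List Char)) : pvConsHead [] l = if l = [] then [[]] else l := by
  cases l <;> simp [pvConsHead]

theorem pvTokSplit_ne_nil (cs : List Char) : pvTokSplit cs ≠ [] := by
  cases cs with
  | nil => simp [pvTokSplit]
  | cons c cs =>
      unfold pvTokSplit
      split
      · simp
      · cases pvTokSplit cs <;> simp [pvConsHead]

-- Chars.replace with single-char old/new is a map
theorem pv_replace_go (a b : Char) :
    ∀ (l : List Char) (fuel : Nat) (acc : List Char), l.length ≤ fuel →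
      PySem.Chars.replace.go [a] [b] fuel l acc
        = acc.reverse ++ l.map (fun c => if c = a then b else c) := by
  intro l
  induction l with
  | nil => intro fuel acc _; cases fuel <;> simp [PySem.Chars.replace.go]
  | cons c t ih =>
      intro fuel acc h
      cases fuel with
      | zero => simp at h
      | succ fuel =>
          have ht : t.length ≤ fuel := by simpa using h
          by_cases hc : c = a
          · have hb : (a == c) = true := by simp [hc]
            simp [PySem.Chars.replace.go, List.isPrefixOf, hc, ih _ _ ht]
          · have hb : (a == c) = false := by
              simp only [beq_eq_false_iff_ne]; exact fun e => hc e.symm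
            simp [PySem.Chars.replace.go, List.isPrefixOf, hb, hc, ih _ _ ht]

theorem pv_replace_single (a b : Char) (s : List Char) :
    PySem.Chars.replace s [a] [b] = s.map (fun c => if c = a then b else c) := by
  simp [PySem.Chars.replace, pv_replace_go a b s s.length [] (le_refl _)]

-- Chars.splitOn with single-char sep, via pvConsHead
def pvCommaSplit : List Char → List (List Char)
  | [] => [[]]
  | c :: cs => if c = ',' then [] :: pvCommaSplit cs else pvConsHead [c] (pvCommaSplit cs)

theorem pvCommaSplit_ne_nil (cs : List Char) : pvCommaSplit cs ≠ [] := by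
  cases cs with
  | nil => simp [pvCommaSplit]
  | cons c cs =>
      unfold pvCommaSplit
      split
      · simp
      · cases pvCommaSplit cs <;> simp [pvConsHead]

theorem pv_splitOn_go :
    ∀ (l : List Char) (fuel : Nat) (cur : List Char) (acc : List (List Char)), l.length ≤ fuel →
      PySem.Chars.splitOn.go [','] fuel l cur acc
        = acc.reverse ++ pvConsHead cur.reverse (pvCommaSplit l) := by
  intro l
  induction l with
  | nil =>
      intro fuel cur acc _
      cases fuel <;> simp [PySem.Chars.splitOn.go, pvCommaSplit, pvConsHead]
  | cons c t ih =>
      intro fuel cur acc h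
      cases fuel with
      | zero => simp at h
      | succ fuel =>
          have ht : t.length ≤ fuel := by simpa using h
          by_cases hc : c = ','
          · have hb : (',' == c) = true := by simp [hc]
            cases hcs : pvCommaSplit t with
            | nil => exact absurd hcs (pvCommaSplit_ne_nil t)
            | cons p ps =>
                simp [PySem.Chars.splitOn.go, List.isPrefixOf, hc, ih _ _ _ ht,
                      pvCommaSplit, pvConsHead, hcs]
          · have hb : (',' == c) = false := by
              simp only [beq_eq_false_iff_ne]; exact fun e => hc e.symm
            simp [PySem.Chars.splitOn.go, List.isPrefixOf, hb, ih _ _ _ ht,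
                  pvCommaSplit, hc, ← pvConsHead_assoc]

theorem pv_splitOn_single (s : List Char) :
    PySem.Chars.splitOn s [','] = pvCommaSplit s := by
  have := pv_splitOn_go s (s.length + 1) [] [] (by omega)
  simpa [PySem.Chars.splitOn, pvConsHead_nil, pvCommaSplit_ne_nil s] using this

theorem pv_comma_split_replace (s : List Char) :
    pvCommaSplit (s.map (fun c => if c = ' ' then ',' else c)) = pvTokSplit s := by
  induction s with
  | nil => rfl
  | cons c cs ih =>
      by_cases h1 : c = ' ' <;> by_cases h2 : c = ',' <;>
        simp [pvCommaSplit, pvTokSplit, h1, h2, ih]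

-- an emitted nonempty token goes through exactly A's loop body
theorem pv_emit_eq_body (t : List Char) (acc : List String)
    (hs : PySem.Chars.strip t ≠ []) :
    pvEmit t acc =
      (match pvAliasMap.lookup (String.ofList (PySem.Chars.lower (PySem.Chars.strip t))) with
        | some val => if acc.contains val then acc else acc ++ [val]
        | none =>
            if acc.contains (pvCapitalize (String.ofList (PySem.Chars.lower (PySem.Chars.strip t)))) then acc
            else acc ++ [pvCapitalize (String.ofList (PySem.Chars.lower (PySem.Chars.strip t)))]) := by
  have htok : PySem.Chars.lower (PySem.Chars.strip t) ≠ [] := by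
    simp [PySem.Chars.lower, hs]
  unfold pvEmit
  rw [if_neg htok]
  cases pvAliasMap.lookup (String.ofList (PySem.Chars.lower (PySem.Chars.strip t))) <;> simp

-- folding A's loop body over the filtered/mapped tokens = folding pvEmit over the raw tokens
theorem pv_fold_emit (toks : List (List Char)) :
    ∀ (acc : List String),
      List.foldl (fun a t => pvEmit t a) acc toks
        = ((toks.filter (fun c => !(PySem.Chars.strip c == []))).map
            (fun c => String.ofList (PySem.Chars.lower (PySem.Chars.strip c)))).foldl
            (fun final_list item =>
              match pvAliasMap.lookup item with
              | some val => if final_list.contains val then final_list else final_list ++ [val]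
              | none =>
                  if final_list.contains (pvCapitalize item) then final_list
                  else final_list ++ [pvCapitalize item])
            acc := by
  induction toks with
  | nil => intro acc; rfl
  | cons t ts ih =>
      intro acc
      by_cases hs : PySem.Chars.strip t = []
      · have h1 : pvEmit t acc = acc := by simp [pvEmit, PySem.Chars.lower, hs]
        simp only [List.foldl_cons, List.filter_cons, hs, h1]
        simpa using ih acc
      · simp only [List.foldl_cons, List.filter_cons,
          show (!(PySem.Chars.strip t == [])) = true by simp [hs]]
        rw [pv_emit_eq_body t acc hs]
        exact ih _

-- B's scanning fold, flushed, equals folding pvEmit over the reference tokens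
theorem pv_scan_fold (cs : List Char) :
    ∀ (cur : List Char) (acc : List String),
      (fun st : List Char × List String => pvEmit st.1 st.2)
          (cs.foldl (fun (st : List Char × List String) ch =>
              if ch = ' ' ∨ ch = ',' then ([], pvEmit st.1 st.2) else (st.1 ++ [ch], st.2))
            (cur, acc))
        = List.foldl (fun a t => pvEmit t a) acc (pvConsHead cur (pvTokSplit cs)) := by
  induction cs with
  | nil => intro cur acc; simp [pvTokSplit, pvConsHead]
  | cons c rest ih =>
      intro cur acc
      by_cases hd : c = ' ' ∨ c = ','
      · simp only [List.foldl_cons]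
        rw [if_pos hd]
        have h2 : pvTokSplit (c :: rest) = [] :: pvTokSplit rest := by simp [pvTokSplit, hd]
        have h3 : pvConsHead cur ([] :: pvTokSplit rest) = cur :: pvTokSplit rest := by
          simp [pvConsHead]
        rw [h2, h3, List.foldl_cons]
        have h4 := ih [] (pvEmit cur acc)
        rwa [pvConsHead_nil, if_neg (pvTokSplit_ne_nil rest)] at h4
      · simp only [List.foldl_cons]
        rw [if_neg hd]
        have h2 : pvTokSplit (c :: rest) = pvConsHead [c] (pvTokSplit rest) := by
          simp [pvTokSplit, hd]
        rw [h2, pvConsHead_assoc]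
        exact ih (cur ++ [c]) acc

-- ===== VERDICT =====
theorem get_crop_list_spec : Claim_equal_get_crop_list := by
  intro crops_str _
  unfold Spec_get_crop_list get_crop_list get_crop_list_alt pvRawList
  rw [pv_replace_single, pv_splitOn_single, pv_comma_split_replace, ← pv_fold_emit]
  have := pv_scan_fold crops_str.toList [] []
  simp only [pvConsHead_nil, pvTokSplit_ne_nil] at this
  exact this.symm
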